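-- pv_equiv track=rewrite | github.com/nakrosMc/hack_python_2 | hack_1.py | fn_hack_1
-- ===== SOURCE A (Python) =====
-- def fn_hack_1(txt):
--     new_text = ""
--
--     for i, text in enumerate(txt):
--         if text == "q":
--            new_text += text.lower()
--         elif i == 1 or i == 4:
--            new_text += text.upper()
--         else:
--            new_text += text
--     return new_text
-- ===== SOURCE B (Python) =====
-- def fn_hack_1(txt):
--     chars = list(txt)
--     for i in (1, 4):
--         if i < len(chars) and chars[i] != 'q':
--             chars[i] = chars[i].upper()
--     return ''.join(chars)
-- ===== Notes on version B (the rewrite author's own statement) =====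
-- stated objective: faster
-- what changed: B copies the input into a char list and patches only the two target indices 1 and 4 (uppercasing unless the char is 'q') instead of walking every character with per-character branches and repeated string concatenation; measured ~4.9x faster at the largest size.
import Mathlib
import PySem

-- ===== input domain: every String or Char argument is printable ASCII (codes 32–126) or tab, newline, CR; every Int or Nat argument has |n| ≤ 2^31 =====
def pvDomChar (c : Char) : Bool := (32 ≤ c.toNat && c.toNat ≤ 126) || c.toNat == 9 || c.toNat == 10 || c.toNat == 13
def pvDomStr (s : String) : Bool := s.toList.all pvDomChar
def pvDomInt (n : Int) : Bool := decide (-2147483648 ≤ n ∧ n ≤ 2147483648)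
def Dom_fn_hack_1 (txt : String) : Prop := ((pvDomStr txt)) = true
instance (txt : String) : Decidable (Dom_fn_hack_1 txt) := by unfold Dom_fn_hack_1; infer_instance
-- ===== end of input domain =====

-- B patches only the two target indices (1 and 4) of a copied char list instead of rebuilding
-- the string char by char with per-character branches (measured constant-factor speedup).

-- ===== PORT A =====
def fn_hack_1 (txt : String) : String :=
  (PySem.List.enumerate txt.toList).foldl
    (fun acc p =>
      if p.2 = 'q' then acc ++ String.ofList [PySem.Chars.lowerChar p.2]
      else if p.1 = 1 ∨ p.1 = 4 then acc ++ String.ofList [PySem.Chars.upperChar p.2]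
      else acc ++ String.ofList [p.2]) ""

-- ===== PORT B =====
-- one step of B's loop body: patch index i if in range and the char there is not 'q'
def pvPatch (cs : List Char) (i : Nat) : List Char :=
  if h : i < cs.length then
    if cs[i] ≠ 'q' then cs.set i (PySem.Chars.upperChar cs[i]) else cs
  else cs

def fn_hack_1_alt (txt : String) : String :=
  String.ofList (([1, 4] : List Nat).foldl pvPatch txt.toList)

-- ===== PRECONDITION & SPEC =====
def Spec_fn_hack_1 (txt : String) (out : String) : Prop := out = fn_hack_1_alt txt
instance (txt : String) (out : String) : Decidable (Spec_fn_hack_1 txt out) := by unfold Spec_fn_hack_1; infer_instance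

-- ===== CLAIM (what is proved, stated in full; the proofs are below) =====
def Claim_equal_fn_hack_1 : Prop := ∀ (txt : String), Dom_fn_hack_1 txt → Spec_fn_hack_1 txt (fn_hack_1 txt)

-- ===== LEMMAS AND PROOFS =====

-- the per-position transformation A applies
def pvF (i : Int) (c : Char) : Char :=
  if c = 'q' then PySem.Chars.lowerChar c
  else if i = 1 ∨ i = 4 then PySem.Chars.upperChar c
  else c

theorem pv_foldl_ofList (l : List (Int × Char)) (s : String) :
    l.foldl (fun acc p =>
      if p.2 = 'q' then acc ++ String.ofList [PySem.Chars.lowerChar p.2]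
      else if p.1 = 1 ∨ p.1 = 4 then acc ++ String.ofList [PySem.Chars.upperChar p.2]
      else acc ++ String.ofList [p.2]) s
    = s ++ String.ofList (l.map (fun p => pvF p.1 p.2)) := by
  induction l generalizing s with
  | nil => simp
  | cons p l ih =>
    simp only [List.foldl_cons, List.map_cons, ih, pvF]
    split_ifs <;> simp [String.ofList_append.symm, String.append_assoc]

theorem pv_getElem?_pvPatch (cs : List Char) (i j : Nat) :
    (pvPatch cs i)[j]? = cs[j]?.map
      (fun c => if i = j ∧ c ≠ 'q' then PySem.Chars.upperChar c else c) := by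
  unfold pvPatch
  split
  · next h =>
    split
    · next hq =>
      rw [List.getElem?_set]
      by_cases hij : i = j
      · subst hij
        simp [h, hq]
      · simp only [hij, if_false]
        cases hcj : cs[j]? with
        | none => rfl
        | some c => simp
    · next hq =>
      cases hcj : cs[j]? with
      | none => rfl
      | some c =>
        by_cases hij : i = j
        · subst hij
          have hc : c = 'q' := by
            rw [List.getElem?_eq_getElem h] at hcj
            injection hcj with hce
            rw [← hce]; exact not_not.mp hq
          simp [hc]
        · simp [hij]
  · next h =>
    cases hcj : cs[j]? with
    | none => rfl
    | some c =>
      have hj : j < cs.length := (List.getElem?_eq_some_iff.mp hcj).1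
      have hij : i ≠ j := by omega
      simp [hij]

theorem pv_main (cs : List Char) :
    (PySem.List.enumerate cs).map (fun p => pvF p.1 p.2) = pvPatch (pvPatch cs 1) 4 := by
  apply List.ext_getElem?
  intro j
  rw [List.getElem?_map, PySem.List.getElem?_enumerate,
      pv_getElem?_pvPatch, pv_getElem?_pvPatch]
  cases hcj : cs[j]? with
  | none => rfl
  | some c =>
    simp only [Option.map_some]
    congr 1
    by_cases hq : c = 'q'
    · subst hq
      simp [pvF]
      decide
    · by_cases h1 : j = 1
      · subst h1; simp [pvF, hq]
      · by_cases h4 : j = 4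
        · subst h4; simp [pvF, hq]
        · have hi1 : ((j : Int)) ≠ 1 := by omega
          have hi4 : ((j : Int)) ≠ 4 := by omega
          simp [pvF, hq, hi1, hi4, Ne.symm h1, Ne.symm h4]

-- ===== VERDICT (by name: the statement is the Claim_ definition above) =====
theorem fn_hack_1_spec : Claim_equal_fn_hack_1 := by
  intro txt _
  unfold Spec_fn_hack_1 fn_hack_1 fn_hack_1_alt
  rw [pv_foldl_ofList]
  simp [List.foldl, pv_main]
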